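-- pv_equiv track=rewrite | github.com/vipasu/RL-for-quantum-legos | lego_env.py | parse_generators
-- ===== SOURCE A (Python) =====
-- def parse_generators(stabs):
--     """separates logical codewords from stabilizers assuming that the first qubit
--     is the new "logical" qubit
--
--     Searches to make sure that the qubit is "correctable" first.
--     """
--     for i in range(len(stabs[0])):
--         identities = []
--         xbars = []
--         zbars = []
--         for s in stabs:
--             remaining_gen = s[:i] + s[i+1:]
--             if s[i] == "I":
--                 identities.append(remaining_gen)
--             elif s[i] == "X":
--                 xbars.append(remaining_gen)
--             elif s[i] == "Z":
--                 zbars.append(remaining_gen)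
--         if len(xbars) > 0 and len(zbars) > 0:
--             return identities, xbars, zbars
--     return None
-- ===== SOURCE B (Python) =====
-- def parse_generators(stabs):
--     """Row-major re-implementation: one pass over the stabilizers collects, per
--     column, whether an X and a Z occur (as two index sets); the winning column is
--     min of their intersection, and the partition is built by a single grouping
--     pass into a dict of buckets."""
--     n = len(stabs[0])
--     xcols, zcols = set(), set()
--     for s in stabs:
--         for i, c in enumerate(s[:n]):
--             if c == "X":
--                 xcols.add(i)
--             elif c == "Z":
--                 zcols.add(i)
--     both = xcols & zcols
--     if not both:
--         return None
--     w = min(both)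
--     buckets = {}
--     for s in stabs:
--         buckets.setdefault(s[w], []).append(s[:w] + s[w+1:])
--     return buckets.get("I", []), buckets.get("X", []), buckets.get("Z", [])
-- ===== Notes on version B (the rewrite author's own statement) =====
-- stated objective: faster
-- what changed: B is row-major: a single pass over the stabilizers collects the sets of columns containing an X and a Z, the winning column is min of their intersection, and one grouping pass into dict buckets builds the partition, instead of A's column-by-column slicing and partitioning of every stabilizer until a column wins.
import Mathlib
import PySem

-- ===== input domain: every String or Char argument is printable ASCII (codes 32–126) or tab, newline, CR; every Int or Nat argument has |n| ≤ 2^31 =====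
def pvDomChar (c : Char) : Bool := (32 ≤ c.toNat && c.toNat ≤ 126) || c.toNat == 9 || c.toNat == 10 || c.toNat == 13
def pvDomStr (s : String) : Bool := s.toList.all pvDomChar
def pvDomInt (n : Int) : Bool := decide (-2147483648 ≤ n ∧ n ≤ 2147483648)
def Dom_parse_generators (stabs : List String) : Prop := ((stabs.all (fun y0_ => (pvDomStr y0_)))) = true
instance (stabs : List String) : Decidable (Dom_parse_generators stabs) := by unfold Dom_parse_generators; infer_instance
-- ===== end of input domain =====

-- B replaces A's column-by-column partitioning with one row-major pass that collects the
-- X- and Z-column index sets, takes min of their intersection as the winning column, and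
-- groups once into dict buckets (objective: faster).

-- shared helpers: s[i] (in range under Pre_) and s[:i] + s[i+1:], on the char-list side
def pvCh (s : List Char) (i : Nat) : Char := s.getD i ' '
def pvRem (s : List Char) (i : Nat) : String := String.ofList (s.take i ++ s.drop (i + 1))

-- ===== PORT A =====
-- inner loop of A: one pass over stabs building the three lists for column i
def pvPartA (stabs : List String) (i : Nat) : List String × List String × List String :=
  stabs.foldl (fun acc s =>
    let t := s.toList
    let rem := pvRem t i
    if pvCh t i = 'I' then (acc.1 ++ [rem], acc.2.1, acc.2.2)
    else if pvCh t i = 'X' then (acc.1, acc.2.1 ++ [rem], acc.2.2)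
    else if pvCh t i = 'Z' then (acc.1, acc.2.1, acc.2.2 ++ [rem])
    else acc) ([], [], [])

-- outer loop of A: for i in range(len(stabs[0])), with the early return
def parse_generatorsGo (stabs : List String) : List Nat → Option (List String × List String × List String)
  | [] => none
  | i :: rest =>
    let p := pvPartA stabs i
    if p.2.1.length > 0 ∧ p.2.2.length > 0 then some p
    else parse_generatorsGo stabs rest

def parse_generators (stabs : List String) : Option (List String × List String × List String) :=
  parse_generatorsGo stabs (List.range (stabs.headD "").toList.length)

-- ===== PORT B =====
-- row-major pass: for s in stabs: for i, c in enumerate(s[:n]): add i to xcols / zcols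
def pvColsB (stabs : List String) (n : Nat) : PySem.Set Nat × PySem.Set Nat :=
  stabs.foldl (fun acc s =>
    (s.toList.take n).zipIdx.foldl (fun (acc2 : PySem.Set Nat × PySem.Set Nat) ci =>
      if ci.1 = 'X' then (PySem.Set.add acc2.1 ci.2, acc2.2)
      else if ci.1 = 'Z' then (acc2.1, PySem.Set.add acc2.2 ci.2)
      else acc2) acc) (PySem.Set.empty, PySem.Set.empty)

-- grouping pass: buckets.setdefault(s[w], []).append(s[:w] + s[w+1:])  (s[w] in range under Pre_)
def pvBucketsB (stabs : List String) (w : Nat) : PySem.Dict Char (List String) :=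
  stabs.foldl (fun d s => d.modify (pvCh s.toList w) [] (· ++ [pvRem s.toList w])) PySem.Dict.empty

-- 'if not both: return None' and 'w = min(both)' together: min? is none exactly on the empty set
def parse_generators_alt (stabs : List String) : Option (List String × List String × List String) :=
  let n := (stabs.headD "").toList.length
  let cols := pvColsB stabs n
  let both := PySem.Set.inter cols.1 cols.2
  match PySem.List.min? both (fun x => x) with
  | none => none
  | some w =>
    let buckets := pvBucketsB stabs w
    some (buckets.getD 'I' [], buckets.getD 'X' [], buckets.getD 'Z' [])

-- ===== PRECONDITION & SPEC =====
-- does column i contain character c?  (used by Pre_ and the proofs)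
def pvHas (stabs : List String) (i : Nat) (c : Char) : Bool :=
  stabs.any (fun s => pvCh s.toList i = c)

-- Pre_ excludes exactly the inputs on which A raises IndexError: the empty list (stabs[0]),
-- and lists where the column search runs past the end of some stabilizer before it reaches
-- a column (fully inside all stabilizers) that contains both an X and a Z.
def Pre_parse_generators (stabs : List String) : Prop :=
  stabs ≠ [] ∧
    ((∀ s ∈ stabs, (stabs.headD "").toList.length ≤ s.toList.length) ∨
     ∃ i < (stabs.headD "").toList.length,
       (∀ s ∈ stabs, i < s.toList.length) ∧
       pvHas stabs i 'X' = true ∧ pvHas stabs i 'Z' = true)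
instance (stabs : List String) : Decidable (Pre_parse_generators stabs) := by
  unfold Pre_parse_generators; infer_instance

def pvWitness_parse_generators : List String := ["XZI", "ZXI", "III"]

def Spec_parse_generators (stabs : List String) (out : Option (List String × List String × List String)) : Prop := out = parse_generators_alt stabs
instance (stabs : List String) (out : Option (List String × List String × List String)) : Decidable (Spec_parse_generators stabs out) := by unfold Spec_parse_generators; infer_instance

-- ===== CLAIM (what is proved, stated in full; the proofs are below) =====
def Claim_equal_parse_generators : Prop := ∀ (stabs : List String), Dom_parse_generators stabs → Pre_parse_generators stabs → Spec_parse_generators stabs (parse_generators stabs)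

-- ===== LEMMAS AND PROOFS =====

-- proof-side helper: the first index in idxs whose column holds both an X and a Z
def pvFindWin (stabs : List String) : List Nat → Option Nat
  | [] => none
  | i :: rest =>
    if pvHas stabs i 'X' && pvHas stabs i 'Z' then some i
    else pvFindWin stabs rest

-- A's inner loop is the three filtered-map lists
theorem pvPartA_eq (stabs : List String) (i : Nat) :
    pvPartA stabs i =
      ((stabs.filter (fun s => pvCh s.toList i = 'I')).map (fun s => pvRem s.toList i),
       (stabs.filter (fun s => pvCh s.toList i = 'X')).map (fun s => pvRem s.toList i),
       (stabs.filter (fun s => pvCh s.toList i = 'Z')).map (fun s => pvRem s.toList i)) := by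
  suffices h : ∀ (l : List String) (a b c : List String),
      l.foldl (fun acc s =>
        let t := s.toList
        let rem := pvRem t i
        if pvCh t i = 'I' then (acc.1 ++ [rem], acc.2.1, acc.2.2)
        else if pvCh t i = 'X' then (acc.1, acc.2.1 ++ [rem], acc.2.2)
        else if pvCh t i = 'Z' then (acc.1, acc.2.1, acc.2.2 ++ [rem])
        else acc) (a, b, c) =
      (a ++ (l.filter (fun s => pvCh s.toList i = 'I')).map (fun s => pvRem s.toList i),
       b ++ (l.filter (fun s => pvCh s.toList i = 'X')).map (fun s => pvRem s.toList i),
       c ++ (l.filter (fun s => pvCh s.toList i = 'Z')).map (fun s => pvRem s.toList i)) by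
    simpa [pvPartA] using h stabs [] [] []
  intro l
  induction l with
  | nil => simp
  | cons s l ih =>
    intro a b c
    by_cases hI : pvCh s.toList i = 'I'
    · simp [hI, ih]
    · by_cases hX : pvCh s.toList i = 'X'
      · simp [hX, ih]
      · by_cases hZ : pvCh s.toList i = 'Z'
        · simp [hZ, ih]
        · simp [hI, hX, hZ, ih]

theorem pvHas_iff (stabs : List String) (i : Nat) (c : Char) :
    pvHas stabs i c = true ↔ ∃ s ∈ stabs, pvCh s.toList i = c := by
  simp [pvHas]

-- A's outer loop is: find the first winning column, partition there
theorem pvGo_eq (stabs : List String) (idxs : List Nat) :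
    parse_generatorsGo stabs idxs =
      match pvFindWin stabs idxs with
      | none => none
      | some w =>
          some ((stabs.filter (fun s => pvCh s.toList w = 'I')).map (fun s => pvRem s.toList w),
                (stabs.filter (fun s => pvCh s.toList w = 'X')).map (fun s => pvRem s.toList w),
                (stabs.filter (fun s => pvCh s.toList w = 'Z')).map (fun s => pvRem s.toList w)) := by
  induction idxs with
  | nil => simp [parse_generatorsGo, pvFindWin]
  | cons i rest ih =>
    have hcond : ((pvPartA stabs i).2.1.length > 0 ∧ (pvPartA stabs i).2.2.length > 0) ↔
        (pvHas stabs i 'X' && pvHas stabs i 'Z') = true := by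
      rw [pvPartA_eq]
      simp [pvHas_iff, List.length_pos_iff, List.filter_eq_nil_iff]
    by_cases h : (pvHas stabs i 'X' && pvHas stabs i 'Z') = true
    · rw [parse_generatorsGo]
      rw [if_pos (hcond.mpr h)]
      simp [pvFindWin, h, pvPartA_eq]
    · rw [parse_generatorsGo]
      rw [if_neg (fun hc => h (hcond.mp hc))]
      simp [pvFindWin, h, ih]

-- membership in B's column sets
theorem mem_pvColsB (stabs : List String) (n : Nat) (j : Nat) :
    (j ∈ (pvColsB stabs n).1 ↔ j < n ∧ pvHas stabs j 'X' = true) ∧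
    (j ∈ (pvColsB stabs n).2 ↔ j < n ∧ pvHas stabs j 'Z' = true) := by
  have inner : ∀ (l : List (Char × Nat)) (acc : PySem.Set Nat × PySem.Set Nat),
      (j ∈ (l.foldl (fun (acc2 : PySem.Set Nat × PySem.Set Nat) ci =>
          if ci.1 = 'X' then (PySem.Set.add acc2.1 ci.2, acc2.2)
          else if ci.1 = 'Z' then (acc2.1, PySem.Set.add acc2.2 ci.2)
          else acc2) acc).1 ↔ j ∈ acc.1 ∨ ('X', j) ∈ l) ∧
      (j ∈ (l.foldl (fun (acc2 : PySem.Set Nat × PySem.Set Nat) ci =>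
          if ci.1 = 'X' then (PySem.Set.add acc2.1 ci.2, acc2.2)
          else if ci.1 = 'Z' then (acc2.1, PySem.Set.add acc2.2 ci.2)
          else acc2) acc).2 ↔ j ∈ acc.2 ∨ ('Z', j) ∈ l) := by
    intro l
    induction l with
    | nil => simp
    | cons ci rest ih =>
      intro acc
      obtain ⟨c, i⟩ := ci
      by_cases hX : c = 'X'
      · subst hX
        rw [List.foldl_cons, if_pos (rfl : ('X':Char) = 'X')]
        constructor
        · rw [(ih _).1]
          simp [PySem.Set.mem_add, or_assoc]
        · rw [(ih _).2]
          simp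
      · by_cases hZ : c = 'Z'
        · subst hZ
          rw [List.foldl_cons, if_neg (by decide : ¬ ('Z' : Char) = 'X'), if_pos (rfl : ('Z':Char) = 'Z')]
          constructor
          · rw [(ih _).1]; simp
          · rw [(ih _).2]
            simp [PySem.Set.mem_add, or_assoc]
        · simp only [List.foldl_cons, if_neg hX, if_neg hZ]
          constructor
          · rw [(ih _).1]; simp [hX, eq_comm]
          · rw [(ih _).2]; simp [hZ, eq_comm]
  have outer : ∀ (l : List String) (acc : PySem.Set Nat × PySem.Set Nat),
      (j ∈ (l.foldl (fun acc s =>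
          (s.toList.take n).zipIdx.foldl (fun (acc2 : PySem.Set Nat × PySem.Set Nat) ci =>
            if ci.1 = 'X' then (PySem.Set.add acc2.1 ci.2, acc2.2)
            else if ci.1 = 'Z' then (acc2.1, PySem.Set.add acc2.2 ci.2)
            else acc2) acc) acc).1 ↔
        j ∈ acc.1 ∨ ∃ s ∈ l, ('X', j) ∈ (s.toList.take n).zipIdx) ∧
      (j ∈ (l.foldl (fun acc s =>
          (s.toList.take n).zipIdx.foldl (fun (acc2 : PySem.Set Nat × PySem.Set Nat) ci =>
            if ci.1 = 'X' then (PySem.Set.add acc2.1 ci.2, acc2.2)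
            else if ci.1 = 'Z' then (acc2.1, PySem.Set.add acc2.2 ci.2)
            else acc2) acc) acc).2 ↔
        j ∈ acc.2 ∨ ∃ s ∈ l, ('Z', j) ∈ (s.toList.take n).zipIdx) := by
    intro l
    induction l with
    | nil => simp
    | cons s rest ih =>
      intro acc
      constructor
      · rw [List.foldl_cons, (ih _).1, (inner _ _).1]
        simp [or_assoc]
      · rw [List.foldl_cons, (ih _).2, (inner _ _).2]
        simp [or_assoc]
  have hzip : ∀ (s : String) (c : Char), (c, j) ∈ (s.toList.take n).zipIdx ↔
      j < n ∧ j < s.toList.length ∧ s.toList.getD j ' ' = c ∧ c ≠ ' ' ∨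
      j < n ∧ j < s.toList.length ∧ s.toList.getD j ' ' = c ∧ c = ' ' := by
    intro s c
    rw [List.mk_mem_zipIdx_iff_getElem?]
    constructor
    · intro h
      have hj : j < (s.toList.take n).length := (List.getElem?_eq_some_iff.mp h).1
      have hjn : j < n := by simpa using lt_of_lt_of_le hj (by simp)
      have hjl : j < s.toList.length := by
        rw [List.length_take] at hj
        exact lt_of_lt_of_le hj (min_le_right _ _)
      have : s.toList[j]? = some c := by
        rw [List.getElem?_take] at h
        simpa [hjn] using h
      have hg : s.toList.getD j ' ' = c := by
        simp [List.getD_eq_getElem?_getD, this]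
      by_cases hc : c = ' '
      · exact Or.inr ⟨hjn, hjl, hg, hc⟩
      · exact Or.inl ⟨hjn, hjl, hg, hc⟩
    · rintro (⟨hjn, hjl, hg, _⟩ | ⟨hjn, hjl, hg, _⟩) <;>
      · rw [List.getElem?_take, if_pos hjn]
        rw [List.getD_eq_getElem?_getD] at hg
        cases h : s.toList[j]? with
        | none => exact absurd (List.getElem?_eq_none_iff.mp h) (by omega)
        | some c' => simpa [h] using hg
  constructor
  · rw [show (pvColsB stabs n).1 = _ from congrArg Prod.fst rfl]
    unfold pvColsB
    rw [(outer _ _).1]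
    simp only [PySem.Set.empty]
    constructor
    · rintro (h | ⟨s, hs, hmem⟩)
      · simp at h
      · rcases (hzip s 'X').mp hmem with ⟨hjn, _, hg, _⟩ | ⟨_, _, _, hc⟩
        · exact ⟨hjn, (pvHas_iff _ _ _).mpr ⟨s, hs, hg⟩⟩
        · exact absurd hc (by decide)
    · rintro ⟨hjn, hhas⟩
      obtain ⟨s, hs, hg⟩ := (pvHas_iff _ _ _).mp hhas
      have hjl : j < s.toList.length := by
        by_contra hnot
        rw [pvCh, List.getD_eq_getElem?_getD, List.getElem?_eq_none (by omega)] at hg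
        exact absurd hg (by decide)
      exact Or.inr ⟨s, hs, (hzip s 'X').mpr (Or.inl ⟨hjn, hjl, hg, by decide⟩)⟩
  · unfold pvColsB
    rw [(outer _ _).2]
    constructor
    · rintro (h | ⟨s, hs, hmem⟩)
      · simp at h
      · rcases (hzip s 'Z').mp hmem with ⟨hjn, _, hg, _⟩ | ⟨_, _, _, hc⟩
        · exact ⟨hjn, (pvHas_iff _ _ _).mpr ⟨s, hs, hg⟩⟩
        · exact absurd hc (by decide)
    · rintro ⟨hjn, hhas⟩
      obtain ⟨s, hs, hg⟩ := (pvHas_iff _ _ _).mp hhas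
      have hjl : j < s.toList.length := by
        by_contra hnot
        rw [pvCh, List.getD_eq_getElem?_getD, List.getElem?_eq_none (by omega)] at hg
        exact absurd hg (by decide)
      exact Or.inr ⟨s, hs, (hzip s 'Z').mpr (Or.inl ⟨hjn, hjl, hg, by decide⟩)⟩

-- membership in B's intersection = "column j < n wins"
theorem mem_both (stabs : List String) (n : Nat) (j : Nat) :
    j ∈ PySem.Set.inter (pvColsB stabs n).1 (pvColsB stabs n).2 ↔
      j < n ∧ (pvHas stabs j 'X' && pvHas stabs j 'Z') = true := by
  rw [PySem.Set.mem_inter]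
  rw [(mem_pvColsB stabs n j).1, (mem_pvColsB stabs n j).2]
  simp; tauto

-- the first winning index of a strictly increasing list is its least winning index
theorem pvFindWin_none (stabs : List String) (idxs : List Nat) :
    pvFindWin stabs idxs = none ↔ ∀ i ∈ idxs, (pvHas stabs i 'X' && pvHas stabs i 'Z') = false := by
  induction idxs with
  | nil => simp [pvFindWin]
  | cons i rest ih =>
    by_cases h : (pvHas stabs i 'X' && pvHas stabs i 'Z') = true
    · rw [pvFindWin, if_pos h]
      constructor
      · intro hc; cases hc
      · intro hall
        have := hall i (List.mem_cons_self ..)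
        rw [h] at this; cases this
    · rw [pvFindWin, if_neg h, ih]
      simp only [List.forall_mem_cons]
      exact (and_iff_right (Bool.eq_false_iff.mpr h)).symm

theorem pvFindWin_some (stabs : List String) (idxs : List Nat)
    (hsort : idxs.Pairwise (· < ·)) (w : Nat) (hw : pvFindWin stabs idxs = some w) :
    w ∈ idxs ∧ (pvHas stabs w 'X' && pvHas stabs w 'Z') = true ∧
      ∀ j ∈ idxs, (pvHas stabs j 'X' && pvHas stabs j 'Z') = true → w ≤ j := by
  induction idxs with
  | nil => simp [pvFindWin] at hw
  | cons i rest ih =>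
    by_cases h : (pvHas stabs i 'X' && pvHas stabs i 'Z') = true
    · rw [pvFindWin, if_pos h] at hw
      cases hw
      refine ⟨by simp, h, ?_⟩
      intro j hj _
      rcases List.mem_cons.mp hj with rfl | hj
      · exact le_refl _
      · exact le_of_lt ((List.pairwise_cons.mp hsort).1 j hj)
    · rw [pvFindWin, if_neg h] at hw
      obtain ⟨hmem, hwin, hmin⟩ := ih (List.pairwise_cons.mp hsort).2 hw
      refine ⟨List.mem_cons_of_mem _ hmem, hwin, ?_⟩
      intro j hj hjw
      rcases List.mem_cons.mp hj with rfl | hj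
      · exact absurd hjw h
      · exact hmin j hj hjw

-- A's first winning column IS min of B's intersection
theorem findWin_eq_min (stabs : List String) (n : Nat) :
    pvFindWin stabs (List.range n) =
      PySem.List.min? (PySem.Set.inter (pvColsB stabs n).1 (pvColsB stabs n).2) (fun x => x) := by
  set both := PySem.Set.inter (pvColsB stabs n).1 (pvColsB stabs n).2 with hboth
  cases hA : pvFindWin stabs (List.range n) with
  | none =>
    cases hB : PySem.List.min? both (fun x => x) with
    | none => rfl
    | some m =>
      have hm := PySem.List.min?_mem hB
      obtain ⟨hmn, hmw⟩ := (mem_both stabs n m).mp hm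
      have := (pvFindWin_none stabs (List.range n)).mp hA m (List.mem_range.mpr hmn)
      rw [hmw] at this; exact absurd this (by decide)
  | some w =>
    obtain ⟨hmem, hwin, hmin⟩ :=
      pvFindWin_some stabs (List.range n) (List.pairwise_lt_range) w hA
    have hwboth : w ∈ both := (mem_both stabs n w).mpr ⟨List.mem_range.mp hmem, hwin⟩
    cases hB : PySem.List.min? both (fun x => x) with
    | none =>
      rw [PySem.List.min?_eq_none_iff] at hB
      rw [hB] at hwboth; simp at hwboth
    | some m =>
      have hm := PySem.List.min?_mem hB
      obtain ⟨hmn, hmw⟩ := (mem_both stabs n m).mp hm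
      have h1 : w ≤ m := hmin m (List.mem_range.mpr hmn) hmw
      have h2 : m ≤ w := PySem.List.min?_isMin hB w hwboth
      exact congrArg some (Nat.le_antisymm h1 h2)

-- B's buckets read back as the filtered-map lists
theorem pvBucketsB_getD (stabs : List String) (w : Nat) (c : Char) :
    (pvBucketsB stabs w).getD c [] =
      (stabs.filter (fun s => pvCh s.toList w = c)).map (fun s => pvRem s.toList w) := by
  unfold pvBucketsB
  rw [show (stabs.foldl (fun d s => d.modify (pvCh s.toList w) [] (· ++ [pvRem s.toList w]))
        PySem.Dict.empty) =
      ((stabs.map (fun s => (pvCh s.toList w, pvRem s.toList w))).foldl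
        (fun d p => d.modify p.1 [] (· ++ [p.2])) PySem.Dict.empty) by
    rw [List.foldl_map]]
  rw [PySem.Dict.getD_foldl_modify_append]
  simp [List.filter_map, Function.comp_def]
  congr 1

-- ===== VERDICT (by name: the statement is the Claim_ definition above) =====
theorem parse_generators_spec : Claim_equal_parse_generators := by
  intro stabs _ _
  unfold Spec_parse_generators parse_generators
  have halt : parse_generators_alt stabs =
      (match PySem.List.min? (PySem.Set.inter (pvColsB stabs (stabs.headD "").toList.length).1
          (pvColsB stabs (stabs.headD "").toList.length).2) (fun x => x) with
        | none => none
        | some w =>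
            some ((pvBucketsB stabs w).getD 'I' [], (pvBucketsB stabs w).getD 'X' [],
              (pvBucketsB stabs w).getD 'Z' [])) := rfl
  rw [halt, pvGo_eq, findWin_eq_min stabs ((stabs.headD "").toList.length)]
  cases hm : PySem.List.min? (PySem.Set.inter (pvColsB stabs (stabs.headD "").toList.length).1
      (pvColsB stabs (stabs.headD "").toList.length).2) (fun x => x) with
  | none => rfl
  | some w => simp [pvBucketsB_getD]
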